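-- pv_equiv track=rewrite | github.com/rsbyrne/thesis | thesiscode/references.py | fix_months
-- ===== SOURCE A (Python) =====
-- def fix_months(text):
--     monthnames = (
--         'jan', 'feb', 'mar', 'apr', 'may', 'jun',
--         'jul', 'aug', 'sep', 'oct', 'nov', 'dec',
--         )
--     for monthi, monthn in enumerate(monthnames):
--         text = text.replace(
--             f'=  {monthn}',
--             f'=  {monthi}',
--             )
--     return text
-- ===== SOURCE B (Python) =====
-- def fix_months(text):
--     # single left-to-right scan replacing '=  <monthname>' via a table, instead of twelve full-text replace passes
--     table = [
--         ('=  jan', '=  0'), ('=  feb', '=  1'), ('=  mar', '=  2'),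
--         ('=  apr', '=  3'), ('=  may', '=  4'), ('=  jun', '=  5'),
--         ('=  jul', '=  6'), ('=  aug', '=  7'), ('=  sep', '=  8'),
--         ('=  oct', '=  9'), ('=  nov', '=  10'), ('=  dec', '=  11'),
--     ]
--     out = []
--     i = 0
--     n = len(text)
--     while i < n:
--         for pat, rep in table:
--             if text.startswith(pat, i):
--                 out.append(rep)
--                 i += len(pat)
--                 break
--         else:
--             out.append(text[i])
--             i += 1
--     return ''.join(out)
-- ===== Notes on version B (the rewrite author's own statement) =====
-- stated objective: alternative
-- what changed: A makes twelve sequential full-text str.replace passes, one per month name; B builds a table of the twelve pattern/replacement pairs once and does a single left-to-right scan, emitting the replacement wherever a pattern starts at the current position and copying the character otherwise.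
import Mathlib
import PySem

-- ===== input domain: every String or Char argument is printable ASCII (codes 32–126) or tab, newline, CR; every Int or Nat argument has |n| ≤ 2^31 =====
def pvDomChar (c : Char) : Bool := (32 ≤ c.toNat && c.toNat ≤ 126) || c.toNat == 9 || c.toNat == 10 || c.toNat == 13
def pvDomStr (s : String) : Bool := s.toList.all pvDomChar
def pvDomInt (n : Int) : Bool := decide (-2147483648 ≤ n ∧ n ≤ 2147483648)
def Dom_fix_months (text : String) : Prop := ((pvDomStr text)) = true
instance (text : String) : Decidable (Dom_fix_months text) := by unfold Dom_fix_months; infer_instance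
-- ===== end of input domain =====

-- B replaces A's twelve sequential full-text str.replace passes by a single left-to-right
-- table-driven scan (objective: alternative single-pass algorithm, same results).

-- ===== PORT A =====
-- A: for monthi, monthn in enumerate(monthnames): text = text.replace(f'=  {monthn}', f'=  {monthi}')
def fix_months (text : String) : String :=
  (PySem.List.enumerate ["jan", "feb", "mar", "apr", "may", "jun",
                         "jul", "aug", "sep", "oct", "nov", "dec"] 0).foldl
    (fun t p => PySem.Str.replace t ("=  " ++ p.2) ("=  " ++ PySem.Int.toStr p.1)) text

-- ===== PORT B =====
-- B's table of (pattern, replacement) pairs, as lists of characters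
def monthTable : List (List Char × List Char) :=
  [("=  jan".toList, "=  0".toList), ("=  feb".toList, "=  1".toList),
   ("=  mar".toList, "=  2".toList), ("=  apr".toList, "=  3".toList),
   ("=  may".toList, "=  4".toList), ("=  jun".toList, "=  5".toList),
   ("=  jul".toList, "=  6".toList), ("=  aug".toList, "=  7".toList),
   ("=  sep".toList, "=  8".toList), ("=  oct".toList, "=  9".toList),
   ("=  nov".toList, "=  10".toList), ("=  dec".toList, "=  11".toList)]

-- B's while loop: at position i, try the table entries in order (the for/break);
-- on a match emit the replacement and skip the pattern, else emit one character.
def fixScan (table : List (List Char × List Char)) : List Char → List Char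
  | [] => []
  | c :: t =>
    match table.find? (fun e => PySem.Chars.startswith (c :: t) e.1) with
    | some e => e.2 ++ fixScan table (t.drop (e.1.length - 1))
    | none => c :: fixScan table t
termination_by cs => cs.length
decreasing_by
  · simp only [List.length_cons, List.length_drop]
    omega
  · simp

def fix_months_alt (text : String) : String :=
  String.ofList (fixScan monthTable text.toList)

-- ===== PRECONDITION & SPEC =====
def Spec_fix_months (text : String) (out : String) : Prop := out = fix_months_alt text
instance (text : String) (out : String) : Decidable (Spec_fix_months text out) := by unfold Spec_fix_months; infer_instance

-- ===== CLAIM (what is proved, stated in full; the proofs are below) =====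
def Claim_equal_fix_months : Prop := ∀ (text : String), Dom_fix_months text → Spec_fix_months text (fix_months text)

-- ===== LEMMAS AND PROOFS =====

-- `repl p r` is Python's s.replace(p, r) for nonempty p, in structural form
def repl (p r : List Char) : List Char → List Char
  | [] => []
  | c :: t =>
    if p.isPrefixOf (c :: t) then r ++ repl p r (t.drop (p.length - 1))
    else c :: repl p r t
termination_by cs => cs.length
decreasing_by
  · simp only [List.length_cons, List.length_drop]
    omega
  · simp

lemma repl_nil (p r : List Char) : repl p r [] = [] := by rw [repl]

lemma repl_cons_pos (p r : List Char) (c : Char) (t : List Char) (h : p <+: c :: t) :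
    repl p r (c :: t) = r ++ repl p r (t.drop (p.length - 1)) := by
  rw [repl, if_pos (List.isPrefixOf_iff_prefix.mpr h)]

lemma repl_cons_neg (p r : List Char) (c : Char) (t : List Char) (h : ¬ p <+: c :: t) :
    repl p r (c :: t) = c :: repl p r t := by
  rw [repl, if_neg (fun hb => h (List.isPrefixOf_iff_prefix.mp hb))]

lemma go_eq_repl (p r : List Char) (hp : p ≠ []) :
    ∀ (fuel : Nat) (l acc : List Char), l.length ≤ fuel →
      PySem.Chars.replace.go p r fuel l acc = acc.reverse ++ repl p r l := by
  intro fuel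
  induction fuel with
  | zero =>
    intro l acc hl
    have : l = [] := List.eq_nil_of_length_eq_zero (Nat.le_zero.mp hl)
    subst this
    rw [repl_nil, PySem.Chars.replace.go]
  | succ n ih =>
    intro l acc hl
    match l with
    | [] =>
      rw [repl_nil, List.append_nil, PySem.Chars.replace.go]
      simp
    | c :: t =>
      rw [PySem.Chars.replace.go]
      have hplen : 1 ≤ p.length := List.length_pos_of_ne_nil hp
      by_cases h : p.isPrefixOf (c :: t)
      · rw [if_pos h]
        have hpre := List.isPrefixOf_iff_prefix.mp h
        have hdrop : (c :: t).drop p.length = t.drop (p.length - 1) := by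
          cases p with
          | nil => exact absurd rfl hp
          | cons a b => simp
        have hle : ((c :: t).drop p.length).length ≤ n := by
          simp only [List.length_drop, List.length_cons] at *
          omega
        rw [ih _ _ hle, repl_cons_pos p r c t hpre, hdrop]
        simp
      · rw [if_neg h]
        have hle : t.length ≤ n := by simp at hl; omega
        rw [ih _ _ hle, repl_cons_neg p r c t (fun hb => h (List.isPrefixOf_iff_prefix.mpr hb))]
        simp

lemma replace_eq_repl (l p r : List Char) (hp : p ≠ []) :
    PySem.Chars.replace l p r = repl p r l := by
  rw [PySem.Chars.replace, if_neg (by simpa using hp)]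
  simpa using go_eq_repl p r hp l.length l [] le_rfl

lemma str_replace_eq (s : String) (p r : String) (hp : p.toList ≠ []) :
    PySem.Str.replace s p r = String.ofList (repl p.toList r.toList s.toList) := by
  rw [PySem.Str.replace, replace_eq_repl _ _ _ hp]

lemma fixScan_nil (tbl : List (List Char × List Char)) : fixScan tbl [] = [] := by
  rw [fixScan]

-- scanning copies a replacement string verbatim: no table pattern can start inside it
lemma scan_transparent (Q : List (List Char × List Char)) :
    ∀ (r : List Char),
      (∀ j, j < r.length → ∀ e ∈ Q, ¬ e.1 <+: r.drop j ∧ ¬ r.drop j <+: e.1) →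
      ∀ Y, fixScan Q (r ++ Y) = r ++ fixScan Q Y := by
  intro r
  induction r with
  | nil => intro _ Y; simp
  | cons c r' ih =>
    intro h Y
    rw [List.cons_append, fixScan]
    have hnone : Q.find? (fun e => PySem.Chars.startswith (c :: (r' ++ Y)) e.1) = none := by
      rw [List.find?_eq_none]
      intro e he
      simp only [PySem.Chars.startswith, Bool.not_eq_true]
      rw [Bool.eq_false_iff]
      intro hb
      have hpre : e.1 <+: (c :: r') ++ Y := by simpa using List.isPrefixOf_iff_prefix.mp hb
      have h0 := h 0 (by simp) e he
      simp only [List.drop_zero] at h0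
      rcases List.prefix_or_prefix_of_prefix hpre (List.prefix_append (c :: r') Y) with h1 | h1
      · exact h0.1 h1
      · exact h0.2 h1
    rw [hnone, ih (fun j hj e he => by
      simpa using h (j + 1) (by simpa using Nat.succ_lt_succ hj) e he) Y]
    simp

-- replace leaves positions before the first possible match untouched
lemma repl_skip (p r : List Char) :
    ∀ (k : Nat) (cs : List Char), (∀ j, j < k → ¬ p <+: cs.drop j) →
      repl p r cs = cs.take k ++ repl p r (cs.drop k) := by
  intro k
  induction k with
  | zero => intro cs _; simp
  | succ n ih =>
    intro cs h
    match cs with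
    | [] => simp
    | c :: t =>
      have h0 : ¬ p <+: c :: t := by simpa using h 0 (Nat.succ_pos n)
      rw [repl_cons_neg p r c t h0,
        ih t (fun j hj => by simpa using h (j + 1) (Nat.succ_lt_succ hj))]
      simp

-- replacing (pattern p, replacement r) cannot create a new match of a table pattern q
-- at the front, because q contains r's first character only at position 0
lemma no_new_match (p r : List Char) (hp : p ≠ []) (hr : r ≠ []) :
    ∀ (cs q : List Char),
      (∀ j, j < q.length → 1 ≤ j → r.head? ≠ q[j]?) →
      ¬ p <+: cs → q <+: repl p r cs → q <+: cs := by
  intro cs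
  induction cs with
  | nil => intro q _ _ h; rwa [repl_nil] at h
  | cons c t ih =>
    intro q hq hpc hq2
    rw [repl_cons_neg p r c t hpc] at hq2
    match q with
    | [] => exact List.nil_prefix
    | a :: q' =>
      obtain ⟨hac, hq'⟩ : a = c ∧ q' <+: repl p r t := by
        rcases hq2 with ⟨s, hs⟩
        injection hs with h1 h2
        exact ⟨h1, ⟨s, h2⟩⟩
      subst hac
      by_cases hpt : p <+: t
      · -- repl p r t starts with r; q' would have to start with r's head char
        match t with
        | [] => exact absurd (List.prefix_nil.mp hpt) hp
        | d :: t' =>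
          rw [repl_cons_pos p r d t' hpt] at hq'
          match q' with
          | [] => exact ⟨d :: t', rfl⟩
          | b :: q'' =>
            exfalso
            obtain ⟨r0, rr, hrr⟩ := List.exists_cons_of_ne_nil hr
            have hb : b = r0 := by
              rcases hq' with ⟨s, hs⟩
              rw [hrr] at hs
              simp only [List.cons_append] at hs
              injection hs with h1 _
            have h1 := hq 1 (by simp) le_rfl
            rw [hrr] at h1
            simp only [List.head?_cons, List.getElem?_cons_succ, List.getElem?_cons_zero] at h1
            exact h1 (by rw [hb])
      · have := ih q' (fun j hj h1 => by
            have := hq (j + 1) (by simpa using Nat.succ_lt_succ hj) (Nat.le_add_left 1 j)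
            simpa using this) hpt hq'
        exact List.cons_prefix_cons.mpr ⟨rfl, this⟩

-- getElem? of a prefix agrees
lemma prefix_getElem? {q cs : List Char} (h : q <+: cs) {j : Nat} (hj : j < q.length) :
    cs[j]? = q[j]? := by
  rcases h with ⟨s, hs⟩
  subst hs
  rw [List.getElem?_append_left hj]

-- THE MAIN LEMMA: one sequential replace pass folded into the scanner's table
lemma scan_absorb (p r : List Char) (Q : List (List Char × List Char))
    (hp : p ≠ []) (hr : r ≠ [])
    (hQne : ∀ e ∈ Q, e.1 ≠ [])
    (htrans : ∀ j, j < r.length → ∀ e ∈ Q, ¬ e.1 <+: r.drop j ∧ ¬ r.drop j <+: e.1)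
    (hpq : ∀ e ∈ Q, ∀ j, j < e.1.length → 1 ≤ j → p.head? ≠ e.1[j]?)
    (hrq : ∀ e ∈ Q, ∀ j, j < e.1.length → 1 ≤ j → r.head? ≠ e.1[j]?)
    (hpref : ∀ e ∈ Q, ∀ e' ∈ Q, e.1 ≠ e'.1 → ¬ e.1 <+: e'.1) :
    ∀ cs, fixScan Q (repl p r cs) = fixScan ((p, r) :: Q) cs := by
  have main : ∀ (n : Nat) (cs : List Char), cs.length ≤ n →
      fixScan Q (repl p r cs) = fixScan ((p, r) :: Q) cs := by
    intro n
    induction n with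
    | zero =>
      intro cs hcs
      have : cs = [] := List.eq_nil_of_length_eq_zero (Nat.le_zero.mp hcs)
      subst this
      rw [repl_nil, fixScan_nil, fixScan_nil]
    | succ n ih =>
      intro cs hcs
      match cs with
      | [] => rw [repl_nil, fixScan_nil, fixScan_nil]
      | c :: t =>
        by_cases hpc : p <+: c :: t
        · -- head matches p: replace emits r, scanner's new head entry fires
          rw [repl_cons_pos p r c t hpc]
          have hplen : 1 ≤ p.length := List.length_pos_of_ne_nil hp
          have hX : (t.drop (p.length - 1)).length ≤ n := by
            simp only [List.length_drop, List.length_cons] at *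
            omega
          rw [scan_transparent Q r htrans, ih _ hX]
          conv_rhs => rw [fixScan]
          have hfind : ((p, r) :: Q).find?
              (fun e => PySem.Chars.startswith (c :: t) e.1) = some (p, r) := by
            rw [List.find?_cons_of_pos]
            simpa [PySem.Chars.startswith] using List.isPrefixOf_iff_prefix.mpr hpc
          rw [hfind]
        · cases hm : Q.find? (fun e => PySem.Chars.startswith (c :: t) e.1) with
          | none =>
            rw [repl_cons_neg p r c t hpc, fixScan]
            have hnone2 : Q.find? (fun e => PySem.Chars.startswith (c :: repl p r t) e.1) = none := by
              rw [List.find?_eq_none]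
              intro e he
              simp only [PySem.Chars.startswith]
              rw [List.isPrefixOf_iff_prefix]
              intro hb
              have hpre : e.1 <+: repl p r (c :: t) := by
                rw [repl_cons_neg p r c t hpc]
                exact hb
              have := no_new_match p r hp hr (c :: t) e.1 (hrq e he) hpc hpre
              have hnm := (List.find?_eq_none.mp hm) e he
              simp only [PySem.Chars.startswith] at hnm
              rw [List.isPrefixOf_iff_prefix] at hnm
              exact hnm this
            have ht : t.length ≤ n := by simp at hcs; omega
            rw [hnone2, ih t ht]
            conv_rhs => rw [fixScan]
            have hf4 : ((p, r) :: Q).find? (fun e => PySem.Chars.startswith (c :: t) e.1) = none := by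
              rw [List.find?_cons_of_neg, hm]
              simp only [PySem.Chars.startswith]
              rw [List.isPrefixOf_iff_prefix]
              exact hpc
            rw [hf4]
          | some e =>
            -- first table match e at the head; replace leaves e's occurrence intact
            obtain ⟨hmatch, Q₁, Q₂, hsplit, hbefore⟩ := List.find?_eq_some_iff_append.mp hm
            have hepre : e.1 <+: c :: t := by
              simp only [PySem.Chars.startswith] at hmatch
              exact List.isPrefixOf_iff_prefix.mp hmatch
            have heQ : e ∈ Q := by rw [hsplit]; exact List.mem_append_right _ (List.mem_cons_self)
            have hene : e.1 ≠ [] := hQne e heQ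
            have helen : 1 ≤ e.1.length := List.length_pos_of_ne_nil hene
            have helecs : e.1.length ≤ t.length + 1 := by
              have := hepre.length_le
              simpa using this
            -- replace skips past e's occurrence
            have hskip : repl p r (c :: t) =
                e.1 ++ repl p r ((c :: t).drop e.1.length) := by
              have hnom : ∀ j, j < e.1.length → ¬ p <+: (c :: t).drop j := by
                intro j hj hpj
                match j with
                | 0 => exact hpc (by simpa using hpj)
                | j' + 1 =>
                  have hph : p.head? = ((c :: t).drop (j' + 1)).head? := by
                    rcases hpj with ⟨s, hs⟩
                    rw [← hs]
                    cases p with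
                    | nil => exact absurd rfl hp
                    | cons a b => simp
                  have hd : ((c :: t).drop (j' + 1)).head? = (c :: t)[j' + 1]? := by
                    rw [List.head?_drop]
                  have hg : (c :: t)[j' + 1]? = e.1[j' + 1]? := prefix_getElem? hepre hj
                  exact hpq e heQ (j' + 1) hj (by omega) (hph.trans (hd.trans hg))
              have := repl_skip p r e.1.length (c :: t) hnom
              rwa [(List.prefix_iff_eq_take.mp hepre).symm] at this
            -- the scanner still finds e first on e.1 ++ …
            have hfind2 : ∀ Y, Q.find? (fun x => PySem.Chars.startswith (e.1 ++ Y) x.1) = some e := by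
              intro Y
              rw [hsplit, List.find?_append]
              have h1 : Q₁.find? (fun x => PySem.Chars.startswith (e.1 ++ Y) x.1) = none := by
                rw [List.find?_eq_none]
                intro x hx
                simp only [PySem.Chars.startswith, Bool.not_eq_true]
                rw [Bool.eq_false_iff]
                intro hb
                have hxp : x.1 <+: e.1 ++ Y := List.isPrefixOf_iff_prefix.mp hb
                have hxQ : x ∈ Q := by rw [hsplit]; exact List.mem_append_left _ hx
                have hbx := hbefore x hx
                simp only [PySem.Chars.startswith, Bool.not_eq_true', Bool.eq_false_iff] at hbx
                by_cases hxe : x.1 = e.1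
                · exact hbx (by rw [List.isPrefixOf_iff_prefix, hxe]; exact hepre)
                · rcases List.prefix_or_prefix_of_prefix hxp (List.prefix_append e.1 Y) with h2 | h2
                  · exact hpref x hxQ e heQ hxe h2
                  · exact hpref e heQ x hxQ (fun hh => hxe hh.symm) h2
              rw [h1, Option.none_or, List.find?_cons_of_pos]
              simp [PySem.Chars.startswith]
            -- evaluate the scanner on e.1 ++ Z
            have hscan : ∀ Z, fixScan Q (e.1 ++ Z) = e.2 ++ fixScan Q Z := by
              intro Z
              obtain ⟨a, rest, he1⟩ := List.exists_cons_of_ne_nil hene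
              have hf := hfind2 Z
              have hdropZ : (rest ++ Z).drop (e.1.length - 1) = Z := by
                rw [he1]
                simp only [List.length_cons, Nat.add_sub_cancel]
                rw [List.drop_append_of_le_length le_rfl, List.drop_length, List.nil_append]
              rw [he1, List.cons_append, fixScan]
              rw [he1, List.cons_append] at hf
              rw [hf]
              show e.2 ++ fixScan Q ((rest ++ Z).drop (e.1.length - 1)) = e.2 ++ fixScan Q Z
              rw [hdropZ]
            have hZlen : ((c :: t).drop e.1.length).length ≤ n := by
              simp only [List.length_drop, List.length_cons] at *
              omega
            rw [hskip, hscan, ih _ hZlen]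
            -- RHS
            have hf3 : ((p, r) :: Q).find? (fun x => PySem.Chars.startswith (c :: t) x.1) = some e := by
              rw [List.find?_cons_of_neg, hm]
              simp only [PySem.Chars.startswith]
              rw [List.isPrefixOf_iff_prefix]
              exact hpc
            conv_rhs => rw [fixScan]
            rw [hf3]
            show _ = e.2 ++ fixScan ((p, r) :: Q) (t.drop (e.1.length - 1))
            have hdd : (c :: t).drop e.1.length = t.drop (e.1.length - 1) := by
              have h1 : e.1.length = (e.1.length - 1) + 1 := by omega
              conv_lhs => rw [h1]
              rw [List.drop_succ_cons]
            rw [hdd]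
  intro cs
  exact main cs.length cs le_rfl

-- empty table: the scanner copies its input
lemma fixScan_empty : ∀ cs, fixScan [] cs = cs := by
  intro cs
  induction cs with
  | nil => rw [fixScan]
  | cons c t ih => rw [fixScan]; simpa using ih

-- one Str-level replace pass at a time, moved down to char lists
lemma strfold (ps : List (Int × String)) :
    ∀ (t : String),
      ps.foldl (fun t p => PySem.Str.replace t ("=  " ++ p.2) ("=  " ++ PySem.Int.toStr p.1)) t =
      String.ofList ((ps.map (fun p => (("=  " ++ p.2).toList, ("=  " ++ PySem.Int.toStr p.1).toList))).foldl
        (fun cs e => repl e.1 e.2 cs) t.toList) := by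
  induction ps with
  | nil => intro t; simp [String.ofList_toList]
  | cons a ps ih =>
    intro t
    simp only [List.foldl_cons, List.map_cons]
    rw [str_replace_eq _ _ _ (by simp [String.toList_append]), ih, String.toList_ofList]

-- A's twelve passes, as a fold of `repl` over the table
lemma A_eq (t : String) :
    fix_months t = String.ofList (monthTable.foldl (fun cs e => repl e.1 e.2 cs) t.toList) := by
  rw [fix_months, strfold]
  congr 1

-- the twelve sequential passes equal B's single scan
lemma chain (cs : List Char) :
    monthTable.foldl (fun cs e => repl e.1 e.2 cs) cs = fixScan monthTable cs := by
  unfold monthTable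
  simp only [List.foldl_cons, List.foldl_nil]
  rw [← scan_absorb "=  jan".toList "=  0".toList
      [("=  feb".toList, "=  1".toList), ("=  mar".toList, "=  2".toList), ("=  apr".toList, "=  3".toList), ("=  may".toList, "=  4".toList), ("=  jun".toList, "=  5".toList), ("=  jul".toList, "=  6".toList), ("=  aug".toList, "=  7".toList), ("=  sep".toList, "=  8".toList), ("=  oct".toList, "=  9".toList), ("=  nov".toList, "=  10".toList), ("=  dec".toList, "=  11".toList)]
      (by decide) (by decide) (by decide) (by decide) (by decide) (by decide) (by decide)]
  rw [← scan_absorb "=  feb".toList "=  1".toList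
      [("=  mar".toList, "=  2".toList), ("=  apr".toList, "=  3".toList), ("=  may".toList, "=  4".toList), ("=  jun".toList, "=  5".toList), ("=  jul".toList, "=  6".toList), ("=  aug".toList, "=  7".toList), ("=  sep".toList, "=  8".toList), ("=  oct".toList, "=  9".toList), ("=  nov".toList, "=  10".toList), ("=  dec".toList, "=  11".toList)]
      (by decide) (by decide) (by decide) (by decide) (by decide) (by decide) (by decide)]
  rw [← scan_absorb "=  mar".toList "=  2".toList
      [("=  apr".toList, "=  3".toList), ("=  may".toList, "=  4".toList), ("=  jun".toList, "=  5".toList), ("=  jul".toList, "=  6".toList), ("=  aug".toList, "=  7".toList), ("=  sep".toList, "=  8".toList), ("=  oct".toList, "=  9".toList), ("=  nov".toList, "=  10".toList), ("=  dec".toList, "=  11".toList)]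
      (by decide) (by decide) (by decide) (by decide) (by decide) (by decide) (by decide)]
  rw [← scan_absorb "=  apr".toList "=  3".toList
      [("=  may".toList, "=  4".toList), ("=  jun".toList, "=  5".toList), ("=  jul".toList, "=  6".toList), ("=  aug".toList, "=  7".toList), ("=  sep".toList, "=  8".toList), ("=  oct".toList, "=  9".toList), ("=  nov".toList, "=  10".toList), ("=  dec".toList, "=  11".toList)]
      (by decide) (by decide) (by decide) (by decide) (by decide) (by decide) (by decide)]
  rw [← scan_absorb "=  may".toList "=  4".toList
      [("=  jun".toList, "=  5".toList), ("=  jul".toList, "=  6".toList), ("=  aug".toList, "=  7".toList), ("=  sep".toList, "=  8".toList), ("=  oct".toList, "=  9".toList), ("=  nov".toList, "=  10".toList), ("=  dec".toList, "=  11".toList)]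
      (by decide) (by decide) (by decide) (by decide) (by decide) (by decide) (by decide)]
  rw [← scan_absorb "=  jun".toList "=  5".toList
      [("=  jul".toList, "=  6".toList), ("=  aug".toList, "=  7".toList), ("=  sep".toList, "=  8".toList), ("=  oct".toList, "=  9".toList), ("=  nov".toList, "=  10".toList), ("=  dec".toList, "=  11".toList)]
      (by decide) (by decide) (by decide) (by decide) (by decide) (by decide) (by decide)]
  rw [← scan_absorb "=  jul".toList "=  6".toList
      [("=  aug".toList, "=  7".toList), ("=  sep".toList, "=  8".toList), ("=  oct".toList, "=  9".toList), ("=  nov".toList, "=  10".toList), ("=  dec".toList, "=  11".toList)]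
      (by decide) (by decide) (by decide) (by decide) (by decide) (by decide) (by decide)]
  rw [← scan_absorb "=  aug".toList "=  7".toList
      [("=  sep".toList, "=  8".toList), ("=  oct".toList, "=  9".toList), ("=  nov".toList, "=  10".toList), ("=  dec".toList, "=  11".toList)]
      (by decide) (by decide) (by decide) (by decide) (by decide) (by decide) (by decide)]
  rw [← scan_absorb "=  sep".toList "=  8".toList
      [("=  oct".toList, "=  9".toList), ("=  nov".toList, "=  10".toList), ("=  dec".toList, "=  11".toList)]
      (by decide) (by decide) (by decide) (by decide) (by decide) (by decide) (by decide)]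
  rw [← scan_absorb "=  oct".toList "=  9".toList
      [("=  nov".toList, "=  10".toList), ("=  dec".toList, "=  11".toList)]
      (by decide) (by decide) (by decide) (by decide) (by decide) (by decide) (by decide)]
  rw [← scan_absorb "=  nov".toList "=  10".toList
      [("=  dec".toList, "=  11".toList)]
      (by decide) (by decide) (by decide) (by decide) (by decide) (by decide) (by decide)]
  rw [← scan_absorb "=  dec".toList "=  11".toList
      []
      (by decide) (by decide) (by decide) (by decide) (by decide) (by decide) (by decide)]
  rw [fixScan_empty]

-- ===== VERDICT (by name: the statement is the Claim_ definition above) =====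
theorem fix_months_spec : Claim_equal_fix_months := by
  intro text _
  unfold Spec_fix_months fix_months_alt
  rw [A_eq, chain]
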